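-- pv_equiv track=rewrite | github.com/maceip/heart-transplant | backend/src/heart_transplant/graph_integrity.py | _layer_statuses
-- ===== SOURCE A (Python) =====
-- def _layer_statuses(checks: list[dict[str, str]]) -> dict[str, str]:
--     layers: dict[str, str] = {}
--     for check in checks:
--         layer = check["layer"]
--         if layers.get(layer) == "fail":
--             continue
--         if layers.get(layer) == "warn" and check["status"] == "pass":
--             continue
--         layers[layer] = check["status"]
--     return layers
-- ===== SOURCE B (Python) =====
-- def _layer_statuses(checks: list[dict[str, str]]) -> dict[str, str]:
--     # Group-by pass: layer -> ordered list of its statuses, then fold each group.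
--     groups: dict[str, list[str]] = {}
--     for check in checks:
--         groups.setdefault(check["layer"], []).append(check["status"])
--     result: dict[str, str] = {}
--     for layer, statuses in groups.items():
--         acc = None
--         for s in statuses:
--             if acc == "fail":
--                 continue
--             if acc == "warn" and s == "pass":
--                 continue
--             acc = s
--         result[layer] = acc
--     return result
-- ===== Notes on version B (the rewrite author's own statement) =====
-- stated objective: alternative
-- what changed: Replaces A's single in-place dict update loop by a two-pass group-by: first build layer -> ordered status list, then fold each group with the fail/warn/pass rule.
-- outside the precondition, e.g. on _layer_statuses([{'layer': 'x', 'status': 'fail'}, {'layer': 'x'}]): A returns {'x': 'fail'}, B raises KeyError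
import Mathlib
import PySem

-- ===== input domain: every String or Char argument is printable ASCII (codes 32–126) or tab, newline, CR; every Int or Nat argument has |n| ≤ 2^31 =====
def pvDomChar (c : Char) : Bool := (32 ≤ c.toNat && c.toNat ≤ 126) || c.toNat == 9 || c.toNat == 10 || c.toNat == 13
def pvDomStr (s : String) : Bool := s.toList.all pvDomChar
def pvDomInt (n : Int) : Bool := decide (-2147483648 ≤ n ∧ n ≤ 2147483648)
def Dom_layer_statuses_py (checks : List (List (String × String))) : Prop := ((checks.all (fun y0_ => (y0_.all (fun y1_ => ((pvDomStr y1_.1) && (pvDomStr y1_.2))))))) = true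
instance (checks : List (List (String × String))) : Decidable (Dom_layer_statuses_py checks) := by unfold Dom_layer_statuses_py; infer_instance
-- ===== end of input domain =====

-- B recomputes the same per-layer statuses by a different decomposition (group-by pass, then a per-group fold)
-- instead of A's single in-place dict-update loop; return-value equivalence is proved on Pre_.

-- ===== PORT A =====
-- A: one loop over checks keeping a dict layer -> current status, updated in place
-- with the fail/warn priority rule.  Where Python raises KeyError (missing
-- "layer"/"status" key, excluded by Pre_) the step leaves the dict unchanged.
def pvStepA (layers : PySem.Dict String String) (check : List (String × String)) : PySem.Dict String String :=
  match (PySem.Dict.mk check).get? "layer" with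
  | none => layers
  | some layer =>
    if layers.get? layer == some "fail" then layers
    else if layers.get? layer == some "warn" && (PySem.Dict.mk check).get? "status" == some "pass" then layers
    else
      match (PySem.Dict.mk check).get? "status" with
      | none => layers
      | some s => layers.insert layer s


-- ===== PORT B =====
-- Pass 1 of Source B: group-by — dict layer -> ordered list of its statuses
-- (groups.setdefault(check["layer"], []).append(check["status"])); missing keys
-- (KeyError in Python, excluded by Pre_) leave the dict unchanged.
def pvStepB (g : PySem.Dict String (List String)) (check : List (String × String)) : PySem.Dict String (List String) :=
  match (PySem.Dict.mk check).get? "layer", (PySem.Dict.mk check).get? "status" with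
  | some l, some s => g.insert l (g.getD l [] ++ [s])
  | _, _ => g


-- Pass 2 of Source B: fold one group's statuses left-to-right, acc starting as None.
def pvRedStep (acc : Option String) (s : String) : Option String :=
  if acc == some "fail" then acc
  else if acc == some "warn" && s == "pass" then acc
  else some s


-- Every group built by pass 1 is nonempty, so the fold never yields none;
-- '.getD ""' only totalizes the Lean function (proved unreachable via pvRed_spec below).
def pvRed (statuses : List String) : String :=
  (statuses.foldl pvRedStep none).getD ""


def layer_statuses_py (checks : List (List (String × String))) : List (String × String) :=
  (checks.foldl pvStepA PySem.Dict.empty).items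

def layer_statuses_py_alt (checks : List (List (String × String))) : List (String × String) :=
  let groups := checks.foldl pvStepB PySem.Dict.empty
  groups.items.map (fun p => (p.1, pvRed p.2))

-- ===== PRECONDITION & SPEC =====
-- Pre_ excludes the inputs on which Python A raises KeyError: a check missing the
-- "layer" or "status" key.  This is slightly narrower than A's exact returning
-- domain: A also returns when a check lacks "status" but its layer has already
-- failed (that check is skipped before the key is read), while B raises KeyError
-- there (see claim.json cites); those inputs are excluded too.
def Pre_layer_statuses_py (checks : List (List (String × String))) : Prop :=
  (checks.all (fun c => (PySem.Dict.mk c).contains "layer" && (PySem.Dict.mk c).contains "status")) = true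
instance (checks : List (List (String × String))) : Decidable (Pre_layer_statuses_py checks) := by unfold Pre_layer_statuses_py; infer_instance

def pvWitness_layer_statuses_py : (List (List (String × String))) :=
  [[("layer", "net"), ("status", "pass")], [("layer", "net"), ("status", "warn")], [("layer", "db"), ("status", "fail")]]

def Spec_layer_statuses_py (checks : List (List (String × String))) (out : List (String × String)) : Prop := out = layer_statuses_py_alt checks
instance (checks : List (List (String × String))) (out : List (String × String)) : Decidable (Spec_layer_statuses_py checks out) := by unfold Spec_layer_statuses_py; infer_instance

-- ===== CLAIM (what is proved, stated in full; the proofs are below) =====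
def Claim_equal_layer_statuses_py : Prop := ∀ (checks : List (List (String × String))), Dom_layer_statuses_py checks → Pre_layer_statuses_py checks → Spec_layer_statuses_py checks (layer_statuses_py checks)

-- ===== LEMMAS AND PROOFS =====
-- Invariant: A's dict state is B's group dict with every group folded by pvRed
-- (same keys, same insertion order); pvStepEq shows one check preserves it.
def pvMapVal (g : PySem.Dict String (List String)) : PySem.Dict String String :=
  PySem.Dict.mk (g.items.map (fun p => (p.1, pvRed p.2)))

theorem pvGet_mapVal (g : PySem.Dict String (List String)) (k : String) :
    (pvMapVal g).get? k = (g.get? k).map pvRed := by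
  show (PySem.Dict.mk (g.items.map (fun p => (p.1, pvRed p.2)))).get? k
      = ((PySem.Dict.mk g.items).get? k).map pvRed
  induction g.items with
  | nil => simp [PySem.Dict.get?]
  | cons h t ih => obtain ⟨k1, v1⟩ := h; simp [PySem.Dict.get?_mk_cons]; split <;> simp [ih]

theorem pvFoldSome (t : List String) (o : Option String) (h : o.isSome) :
    (t.foldl pvRedStep o).isSome := by
  induction t generalizing o with
  | nil => exact h
  | cons x t ih =>
      apply ih
      simp only [pvRedStep]
      split
      · exact h
      · split
        · exact h
        · rfl

theorem pvRed_spec (xs : List String) (h : xs ≠ []) :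
    xs.foldl pvRedStep none = some (pvRed xs) := by
  have : (xs.foldl pvRedStep none).isSome := by
    match xs, h with
    | x :: t, _ =>
      show ((x :: t).foldl pvRedStep none).isSome
      simp only [List.foldl_cons]
      apply pvFoldSome
      simp [pvRedStep]
  obtain ⟨a, ha⟩ := Option.isSome_iff_exists.mp this
  simp [pvRed, ha]

theorem pvMapVal_items (g : PySem.Dict String (List String)) :
    (pvMapVal g).items = g.items.map (fun p => (p.1, pvRed p.2)) := rfl

theorem pvStepEq (c : List (String × String)) (g : PySem.Dict String (List String))
    (hne : ∀ p ∈ g.items, p.2 ≠ []) (hnd : g.keys.Nodup) :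
    pvStepA (pvMapVal g) c = pvMapVal (pvStepB g c) := by
  unfold pvStepA pvStepB
  cases hl : (PySem.Dict.mk c).get? "layer" with
  | none => rfl
  | some l =>
  cases hs : (PySem.Dict.mk c).get? "status" with
  | none =>
      simp only
      split
      · rfl
      · simp
  | some s =>
  show (if ((pvMapVal g).get? l == some "fail") = true then pvMapVal g
        else if ((pvMapVal g).get? l == some "warn" && (some s == some "pass")) = true then pvMapVal g
        else (pvMapVal g).insert l s)
      = pvMapVal (g.insert l (g.getD l [] ++ [s]))
  cases hgo : g.get? l with
  | none =>
      have hd : (pvMapVal g).get? l = none := by rw [pvGet_mapVal, hgo]; rfl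
      have hc : (pvMapVal g).contains l = false := by
        rw [PySem.Dict.contains_eq_isSome_get?, hd]; rfl
      have hcg : g.contains l = false := by
        rw [PySem.Dict.contains_eq_isSome_get?, hgo]; rfl
      rw [PySem.Dict.getD_of_get?_eq_none g ([]) hgo]
      simp only [hd]
      rw [if_neg (by simp), if_neg (by simp)]
      apply PySem.Dict.ext
      rw [PySem.Dict.items_insert_of_not_contains _ _ hc,
          pvMapVal_items (g.insert l ([] ++ [s])),
          PySem.Dict.items_insert_of_not_contains _ _ hcg, List.map_append, pvMapVal_items]
      simp [pvRed, pvRedStep]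
  | some xs =>
      have hmem : (l, xs) ∈ g.items := PySem.Dict.mem_items_of_get?_eq_some g hgo
      have hxne : xs ≠ [] := hne (l, xs) hmem
      have hfold : xs.foldl pvRedStep none = some (pvRed xs) := pvRed_spec xs hxne
      set a := pvRed xs with hadef
      have hd : (pvMapVal g).get? l = some a := by rw [pvGet_mapVal, hgo]; rfl
      have hc : (pvMapVal g).contains l = true := by
        rw [PySem.Dict.contains_eq_isSome_get?, hd]; rfl
      have hcg : g.contains l = true := by
        rw [PySem.Dict.contains_eq_isSome_get?, hgo]; rfl
      have huniq : ∀ p ∈ g.items, p.1 = l → p = (l, xs) := fun p hp h => by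
        have hnd' : (List.map Prod.fst g.items).Nodup := hnd
        exact List.inj_on_of_nodup_map hnd' hp hmem h
      have hred : pvRed (xs ++ [s]) = (pvRedStep (some a) s).getD "" := by
        simp [pvRed, List.foldl_append, hfold]
      rw [PySem.Dict.getD_of_get?_eq_some g ([]) hgo]
      simp only [hd]
      by_cases ha : a = "fail"
      · rw [if_pos (by simp [ha])]
        apply PySem.Dict.ext
        rw [pvMapVal_items (g.insert l (xs ++ [s])), PySem.Dict.items_insert_of_contains _ _ hcg,
            List.map_map, pvMapVal_items]
        apply List.map_congr_left
        intro p hp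
        by_cases hpl : p.1 = l
        · have hpe : p = (l, xs) := huniq p hp hpl
          subst hpe
          have hv : pvRed (xs ++ [s]) = a := by rw [hred]; simp [pvRedStep, ha]
          simp [Function.comp, hv, ← hadef]
        · simp [Function.comp, hpl]
      · by_cases hw : a = "warn" ∧ s = "pass"
        · rw [if_neg (by simp [ha]), if_pos (by simp [hw.1, hw.2])]
          apply PySem.Dict.ext
          rw [pvMapVal_items (g.insert l (xs ++ [s])), PySem.Dict.items_insert_of_contains _ _ hcg,
              List.map_map, pvMapVal_items]
          apply List.map_congr_left
          intro p hp
          by_cases hpl : p.1 = l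
          · have hpe : p = (l, xs) := huniq p hp hpl
            subst hpe
            have hv : pvRed (xs ++ [s]) = a := by
              rw [hred]; simp [pvRedStep, hw.1, hw.2]
            simp [Function.comp, hv, ← hadef]
          · simp [Function.comp, hpl]
        · rw [if_neg (by simp [ha]),
              if_neg (show ¬((some a == some "warn" && (some s == some "pass")) = true) from by
                rcases not_and_or.mp hw with h | h <;> simp [h])]
          have hv : pvRed (xs ++ [s]) = s := by
            rw [hred]
            simp only [pvRedStep]
            rw [if_neg (by simp [ha]),
                if_neg (show ¬((some a == some "warn" && (s == "pass")) = true) from by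
                  rcases not_and_or.mp hw with h | h <;> simp [h])]
            rfl
          apply PySem.Dict.ext
          rw [pvMapVal_items (g.insert l (xs ++ [s])), PySem.Dict.items_insert_of_contains _ _ hcg,
              List.map_map, PySem.Dict.items_insert_of_contains _ _ hc, pvMapVal_items, List.map_map]
          apply List.map_congr_left
          intro p hp
          by_cases hpl : p.1 = l
          · simp [Function.comp, hpl, hv]
          · simp [Function.comp, hpl]

theorem pvStepNe (c : List (String × String)) (g : PySem.Dict String (List String))
    (hne : ∀ p ∈ g.items, p.2 ≠ []) : ∀ p ∈ (pvStepB g c).items, p.2 ≠ [] := by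
  unfold pvStepB
  cases hl : (PySem.Dict.mk c).get? "layer" with
  | none => exact hne
  | some l =>
  cases hs : (PySem.Dict.mk c).get? "status" with
  | none => exact hne
  | some s =>
      intro p hp
      rw [PySem.Dict.items_insert] at hp
      split at hp
      · obtain ⟨q, hq, heq⟩ := List.mem_map.mp hp
        by_cases hql : (q.1 == l) = true
        · rw [if_pos hql] at heq; subst heq; simp
        · rw [if_neg hql] at heq; subst heq; exact hne q hq
      · rcases List.mem_append.mp hp with h | h
        · exact hne p h
        · simp only [List.mem_singleton] at h; subst h; simp

theorem pvStepNodup (c : List (String × String)) (g : PySem.Dict String (List String))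
    (hnd : g.keys.Nodup) : (pvStepB g c).keys.Nodup := by
  unfold pvStepB
  cases hl : (PySem.Dict.mk c).get? "layer" with
  | none => exact hnd
  | some l =>
  cases hs : (PySem.Dict.mk c).get? "status" with
  | none => exact hnd
  | some s => exact PySem.Dict.nodup_keys_insert _ _ _ hnd

theorem pvLoop (cs : List (List (String × String))) (g : PySem.Dict String (List String))
    (hne : ∀ p ∈ g.items, p.2 ≠ []) (hnd : g.keys.Nodup) :
    cs.foldl pvStepA (pvMapVal g) = pvMapVal (cs.foldl pvStepB g) := by
  induction cs generalizing g with
  | nil => rfl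
  | cons c cs ih =>
      simp only [List.foldl_cons]
      rw [pvStepEq c g hne hnd]
      exact ih _ (pvStepNe c g hne) (pvStepNodup c g hnd)

theorem pvFinal (checks : List (List (String × String))) :
    layer_statuses_py checks = layer_statuses_py_alt checks := by
  show (checks.foldl pvStepA PySem.Dict.empty).items
      = (checks.foldl pvStepB PySem.Dict.empty).items.map (fun p => (p.1, pvRed p.2))
  have h0 : (PySem.Dict.empty : PySem.Dict String String) = pvMapVal PySem.Dict.empty := rfl
  rw [h0, pvLoop checks PySem.Dict.empty (by simp [PySem.Dict.empty]) (by simp)]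
  rfl

-- ===== VERDICT (by name: the statement is the Claim_ definition above) =====
theorem layer_statuses_py_spec : Claim_equal_layer_statuses_py :=
  fun checks _ _ => pvFinal checks
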